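-- pv_equiv track=rewrite | github.com/easyctf/easyctf-2015 | api/program-data/generators/string-change.py | strChanger
-- ===== SOURCE A (Python) =====
-- def strChanger(s,a):
-- 	sList = list(s)
-- 	for x in a:
-- 	    for i in range(len(s)):
-- 	        if i+1 < len(s) and (i+1)%x == 0:
-- 	            if ord(sList[i+1]) < 122 and ord(sList[i+1]) >= 90:
-- 	                sList[i+1] = chr(ord(sList[i+1])+1)
-- 	            elif ord(sList[i+1]) == 122:
-- 	                sList[i+1] = chr(97)
-- 	            elif ord(sList[i+1]) < 90 and ord(sList[i+1]) >= 65: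
-- 	                sList[i+1] = chr(ord(sList[i+1])+1)
-- 	            elif ord(sList[i+1]) == 90:
-- 	                sList[i+1] = chr(65)
-- 	newS = "".join(sList)
-- 	return newS
-- ===== SOURCE B (Python) =====
-- def strChanger(s, a):
--     out = []
--     for j, ch in enumerate(s):
--         if j == 0:
--             out.append(ch)
--         else:
--             k = sum(1 for x in a if j % x == 0)
--             c = ord(ch)
--             for _ in range(k):
--                 if 65 <= c <= 121:
--                     c += 1
--                 elif c == 122:
--                     c = 97
--             out.append(chr(c))
--     return "".join(out)
-- ===== Notes on version B (the rewrite author's own statement) =====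
-- stated objective: faster
-- what changed: B makes a single pass over the string positions, counting for each position how many elements of a divide it and applying the letter shift that many times, instead of A's one full mutation pass over the whole string per element of a.
import Mathlib
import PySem

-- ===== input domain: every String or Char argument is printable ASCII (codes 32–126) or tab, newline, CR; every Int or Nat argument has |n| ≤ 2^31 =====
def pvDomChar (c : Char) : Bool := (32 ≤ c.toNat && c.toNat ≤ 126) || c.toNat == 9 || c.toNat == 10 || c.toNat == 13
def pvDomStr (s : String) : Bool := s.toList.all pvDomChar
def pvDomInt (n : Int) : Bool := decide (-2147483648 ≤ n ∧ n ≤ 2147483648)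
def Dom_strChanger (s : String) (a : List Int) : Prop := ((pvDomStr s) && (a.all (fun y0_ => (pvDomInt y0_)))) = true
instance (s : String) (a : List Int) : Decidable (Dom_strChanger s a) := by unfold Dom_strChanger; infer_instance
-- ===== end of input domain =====

-- B replaces A's one-mutation-pass-per-element-of-a with a single pass over the positions,
-- counting each position's divisors in a and applying the letter shift that many times
-- (same return value; constant-factor speedup measured; A mutates no
-- argument observably — 's' is copied into a fresh list).

-- ===== PORT A =====
-- loop body of A's inner 'for i in range(len(s))' (branches in A's order)
def bodyA (n : Nat) (x : Int) (sl : List Char) (i : Nat) : List Char :=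
  if i + 1 < n ∧ PySem.Int.mod ((i : Int) + 1) x = 0 then
    if (sl.getD (i+1) ' ').toNat < 122 ∧ 90 ≤ (sl.getD (i+1) ' ').toNat then
      sl.set (i+1) (Char.ofNat ((sl.getD (i+1) ' ').toNat + 1))
    else if (sl.getD (i+1) ' ').toNat = 122 then
      sl.set (i+1) (Char.ofNat 97)
    else if (sl.getD (i+1) ' ').toNat < 90 ∧ 65 ≤ (sl.getD (i+1) ' ').toNat then
      sl.set (i+1) (Char.ofNat ((sl.getD (i+1) ' ').toNat + 1))
    else if (sl.getD (i+1) ' ').toNat = 90 then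
      sl.set (i+1) (Char.ofNat 65)
    else sl
  else sl

-- A's inner loop: one full pass over the string for one element x of a
def passA (n : Nat) (x : Int) (sl : List Char) : List Char :=
  (List.range n).foldl (bodyA n x) sl

def strChanger (s : String) (a : List Int) : String :=
  String.mk (a.foldl (fun sl x => passA s.toList.length x sl) s.toList)

-- ===== PORT B =====
-- one application of the letter shift (body of B's 'for _ in range(k)')
def stepAlt (c : Nat) : Nat :=
  if 65 ≤ c ∧ c ≤ 121 then c + 1
  else if c = 122 then 97
  else c

def strChanger_alt (s : String) (a : List Int) : String :=
  String.mk ((PySem.List.enumerate s.toList).foldl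
    (fun out jc =>
      if jc.1 = 0 then out ++ [jc.2]
      else out ++ [Char.ofNat (stepAlt^[a.countP (fun x => PySem.Int.mod jc.1 x == 0)] jc.2.toNat)])
    [])

-- ===== PRECONDITION & SPEC =====
-- Pre_ excludes exactly the inputs where Python A raises ZeroDivisionError:
-- 0 ∈ a with at least two characters in s (the modulus is evaluated only when i+1 < len(s)).
def Pre_strChanger (s : String) (a : List Int) : Prop := (0 : Int) ∉ a ∨ s.toList.length ≤ 1
instance (s : String) (a : List Int) : Decidable (Pre_strChanger s a) := by unfold Pre_strChanger; infer_instance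
def pvWitness_strChanger : String × List Int := ("abZz[", [2, 3, -2])

def Spec_strChanger (s : String) (a : List Int) (out : String) : Prop := out = strChanger_alt s a
instance (s : String) (a : List Int) (out : String) : Decidable (Spec_strChanger s a out) := by unfold Spec_strChanger; infer_instance

-- ===== CLAIM (what is proved, stated in full; the proofs are below) =====
def Claim_equal_strChanger : Prop := ∀ (s : String) (a : List Int), Dom_strChanger s a → Pre_strChanger s a → Spec_strChanger s a (strChanger s a)

-- ===== LEMMAS AND PROOFS =====

lemma toNat_ofNat_le (n : Nat) (h : n ≤ 126) : (Char.ofNat n).toNat = n := by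
  have hv : Nat.isValidChar n := Or.inl (by omega)
  simp [Char.ofNat, hv]

lemma getD_set_char (l : List Char) (i j : Nat) (v d : Char) :
    (l.set i v).getD j d = if i = j ∧ i < l.length then v else l.getD j d := by
  simp only [List.getD, List.getElem?_set]
  split_ifs <;> simp_all <;> omega

lemma stepAlt_le (c : Nat) (h : c ≤ 126) : stepAlt c ≤ 126 := by
  unfold stepAlt; split_ifs <;> omega

-- A's four branches are one conditional set with B's letter shift
lemma bodyA_eq (n : Nat) (x : Int) (sl : List Char) (i : Nat) (hl : sl.length = n) :
    bodyA n x sl i = if i + 1 < n ∧ PySem.Int.mod ((i : Int) + 1) x = 0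
      then sl.set (i+1) (Char.ofNat (stepAlt (sl.getD (i+1) ' ').toNat)) else sl := by
  unfold bodyA
  by_cases hc : i + 1 < n ∧ PySem.Int.mod ((i : Int) + 1) x = 0
  · simp only [if_pos hc]
    by_cases h1 : (sl.getD (i+1) ' ').toNat < 122 ∧ 90 ≤ (sl.getD (i+1) ' ').toNat
    · rw [if_pos h1]; unfold stepAlt; rw [if_pos (by omega)]
    · rw [if_neg h1]
      by_cases h2 : (sl.getD (i+1) ' ').toNat = 122
      · rw [if_pos h2]; unfold stepAlt; rw [if_neg (by omega), if_pos (by omega)]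
      · rw [if_neg h2]
        by_cases h3 : (sl.getD (i+1) ' ').toNat < 90 ∧ 65 ≤ (sl.getD (i+1) ' ').toNat
        · rw [if_pos h3]; unfold stepAlt; rw [if_pos (by omega)]
        · rw [if_neg h3, if_neg (by omega)]
          have hstep : stepAlt (sl.getD (i+1) ' ').toNat = (sl.getD (i+1) ' ').toNat := by
            unfold stepAlt; rw [if_neg (by omega), if_neg (by omega)]
          have hin : i + 1 < sl.length := by omega
          rw [hstep, List.getD_eq_getElem _ _ hin, Char.ofNat_toNat, List.set_getElem_self]
  · simp only [if_neg hc]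

-- the first m iterations of A's inner loop, position by position
lemma passA_prefix (n : Nat) (x : Int) (sl : List Char) (hl : sl.length = n) (m : Nat) :
    ((List.range m).foldl (bodyA n x) sl).length = n ∧
    ∀ j, ((List.range m).foldl (bodyA n x) sl).getD j ' ' =
      if 0 < j ∧ j ≤ m ∧ j < n ∧ PySem.Int.mod (j : Int) x = 0
      then Char.ofNat (stepAlt (sl.getD j ' ').toNat) else sl.getD j ' ' := by
  induction m with
  | zero =>
    refine ⟨by simpa using hl, fun j => ?_⟩
    rw [if_neg (by rintro ⟨h1, h2, _⟩; omega)]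
    simp
  | succ m ih =>
    obtain ⟨ihl, ihg⟩ := ih
    rw [List.range_succ, List.foldl_append]
    simp only [List.foldl_cons, List.foldl_nil]
    rw [bodyA_eq n x _ m ihl]
    have hcast : ((m : Int) + 1) = (((m + 1 : Nat)) : Int) := by push_cast; ring
    by_cases hc : m + 1 < n ∧ PySem.Int.mod ((m : Int) + 1) x = 0
    · rw [if_pos hc]
      refine ⟨by simp [ihl], fun j => ?_⟩
      rw [getD_set_char]
      by_cases hj : m + 1 = j
      · subst hj
        rw [if_pos ⟨rfl, by omega⟩]
        rw [ihg (m+1), if_neg (by rintro ⟨_, h2, _⟩; omega)]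
        rw [if_pos ⟨by omega, by omega, hc.1, by rw [← hcast]; exact hc.2⟩]
      · rw [if_neg (by rintro ⟨h, _⟩; exact hj h), ihg j]
        apply if_congr _ rfl rfl
        constructor
        · rintro ⟨a1, a2, a3, a4⟩; exact ⟨a1, by omega, a3, a4⟩
        · rintro ⟨a1, a2, a3, a4⟩; exact ⟨a1, by omega, a3, a4⟩
    · rw [if_neg hc]
      refine ⟨ihl, fun j => ?_⟩
      rw [ihg j]
      apply if_congr _ rfl rfl
      constructor
      · rintro ⟨a1, a2, a3, a4⟩; exact ⟨a1, by omega, a3, a4⟩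
      · rintro ⟨a1, a2, a3, a4⟩
        refine ⟨a1, ?_, a3, a4⟩
        rcases Nat.lt_or_ge j (m+1) with h | h
        · omega
        · exfalso
          have hj : j = m + 1 := by omega
          exact hc ⟨by omega, by rw [hcast, ← hj]; exact a4⟩


lemma passA_getD (n : Nat) (x : Int) (sl : List Char) (hl : sl.length = n) :
    (passA n x sl).length = n ∧
    ∀ j, (passA n x sl).getD j ' ' =
      if 0 < j ∧ j < n ∧ PySem.Int.mod (j : Int) x = 0
      then Char.ofNat (stepAlt (sl.getD j ' ').toNat) else sl.getD j ' ' := by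
  obtain ⟨h1, h2⟩ := passA_prefix n x sl hl n
  refine ⟨h1, fun j => ?_⟩
  rw [passA, h2 j]
  apply if_congr _ rfl rfl
  constructor
  · rintro ⟨a1, _, a3, a4⟩; exact ⟨a1, a3, a4⟩
  · rintro ⟨a1, a3, a4⟩; exact ⟨a1, by omega, a3, a4⟩

lemma passA_bound (n : Nat) (x : Int) (sl : List Char) (hl : sl.length = n)
    (hb : ∀ c ∈ sl, c.toNat ≤ 126) : ∀ c ∈ passA n x sl, c.toNat ≤ 126 := by
  obtain ⟨h1, h2⟩ := passA_getD n x sl hl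
  intro c hc
  obtain ⟨j, hj, hcj⟩ := List.getElem_of_mem hc
  have : c = (passA n x sl).getD j ' ' := by
    rw [List.getD_eq_getElem _ _ hj, hcj]
  rw [this, h2 j]
  have hmem : j < n → sl.getD j ' ' ∈ sl := fun h => by
    rw [List.getD_eq_getElem _ _ (by omega)]; exact List.getElem_mem _
  split_ifs with h
  · have := hb _ (hmem h.2.1)
    rw [toNat_ofNat_le _ (stepAlt_le _ this)]
    exact stepAlt_le _ this
  · rcases Nat.lt_or_ge j sl.length with hlt | hge
    · exact hb _ (hmem (by omega))
    · rw [List.getD_eq_default _ _ hge]; decide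

-- A's outer loop: position j ends up shifted once per element of a that divides j
lemma foldA_getD (n : Nat) (a : List Int) : ∀ sl : List Char, sl.length = n →
    (∀ c ∈ sl, c.toNat ≤ 126) →
    (a.foldl (fun sl x => passA n x sl) sl).length = n ∧
    (∀ c ∈ a.foldl (fun sl x => passA n x sl) sl, c.toNat ≤ 126) ∧
    ∀ j, j < n → (a.foldl (fun sl x => passA n x sl) sl).getD j ' ' =
      if j = 0 then sl.getD 0 ' '
      else Char.ofNat (stepAlt^[a.countP (fun x => PySem.Int.mod (j : Int) x == 0)] (sl.getD j ' ').toNat) := by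
  induction a with
  | nil =>
    intro sl hl hb
    refine ⟨hl, hb, fun j hj => ?_⟩
    split_ifs with h
    · subst h; rfl
    · simp [Function.iterate_zero, Char.ofNat_toNat]
  | cons x a ih =>
    intro sl hl hb
    simp only [List.foldl_cons]
    obtain ⟨pl, pg⟩ := passA_getD n x sl hl
    have pb := passA_bound n x sl hl hb
    obtain ⟨rl, rb, rg⟩ := ih (passA n x sl) pl pb
    refine ⟨rl, rb, fun j hj => ?_⟩
    rw [rg j hj]
    by_cases hj0 : j = 0
    · subst hj0
      rw [if_pos rfl, if_pos rfl, pg 0, if_neg (by rintro ⟨h, _⟩; omega)]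
    · rw [if_neg hj0, if_neg hj0, pg j]
      have hcode : (sl.getD j ' ').toNat ≤ 126 := by
        refine hb _ ?_
        rw [List.getD_eq_getElem _ _ (by omega)]
        exact List.getElem_mem _
      rw [List.countP_cons]
      by_cases hm : PySem.Int.mod (j : Int) x = 0
      · rw [if_pos ⟨by omega, hj, hm⟩]
        rw [toNat_ofNat_le _ (stepAlt_le _ hcode)]
        rw [if_pos (by simpa using hm), ← Function.iterate_succ_apply]
      · rw [if_neg (by rintro ⟨_, _, h⟩; exact hm h)]
        rw [if_neg (by simpa using hm)]
        simp


-- B is the map of the per-position shift over the enumerated string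
lemma alt_eq_map (s : String) (a : List Int) :
    strChanger_alt s a = String.mk ((PySem.List.enumerate s.toList).map
      (fun jc => if jc.1 = 0 then jc.2
        else Char.ofNat (stepAlt^[a.countP (fun x => PySem.Int.mod jc.1 x == 0)] jc.2.toNat))) := by
  unfold strChanger_alt
  congr 1
  have hfun : (fun (out : List Char) (jc : Int × Char) =>
      if jc.1 = 0 then out ++ [jc.2]
      else out ++ [Char.ofNat (stepAlt^[a.countP (fun x => PySem.Int.mod jc.1 x == 0)] jc.2.toNat)]) =
      fun out jc => out ++ [if jc.1 = 0 then jc.2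
        else Char.ofNat (stepAlt^[a.countP (fun x => PySem.Int.mod jc.1 x == 0)] jc.2.toNat)] := by
    funext out jc; split <;> rfl
  rw [hfun, PySem.List.foldl_append_singleton_eq_map, List.nil_append]

-- ===== VERDICT (by name: the statement is the Claim_ definition above) =====
theorem strChanger_spec : Claim_equal_strChanger := by
  unfold Claim_equal_strChanger
  intro s a hdom _hpre
  unfold Spec_strChanger
  rw [alt_eq_map]
  unfold strChanger
  congr 1
  have hb : ∀ c ∈ s.toList, c.toNat ≤ 126 := by
    intro c hc
    simp only [Dom_strChanger, Bool.and_eq_true, pvDomStr] at hdom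
    have := (List.all_eq_true.mp hdom.1) c hc
    simp only [pvDomChar, Bool.or_eq_true, Bool.and_eq_true, decide_eq_true_eq, beq_iff_eq] at this
    omega
  obtain ⟨hlen, _hbnd, hget⟩ := foldA_getD s.toList.length a s.toList rfl hb
  apply List.ext_getElem
  · rw [hlen, List.length_map, PySem.List.length_enumerate]
  · intro j h1 h2
    rw [← List.getD_eq_getElem _ ' ' h1, hget j (by omega)]
    simp only [PySem.List.enumerate_eq_zipIdx_map, List.getElem_map, List.getElem_zipIdx, zero_add]
    by_cases hj0 : j = 0
    · subst hj0
      rw [if_pos rfl, List.getD_eq_getElem _ _ (by omega)]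
      simp
    · rw [if_neg hj0, if_neg (by exact_mod_cast hj0)]
      rw [List.getD_eq_getElem _ _ (by omega)]
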